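-- pv_equiv track=rewrite | github.com/kkulczak/University | sztuczna_inteligencja/1-lab/chess.py | towerMoves
-- ===== SOURCE A (Python) =====
-- MAX_BOARD = 8
--
-- def isOnBoard(pos):
--     return pos[0] in range(MAX_BOARD) and pos[1] in range(MAX_BOARD)
--
-- def towerMoves(state):
--     pos = state[1]
--     j = pos[0]
--     a = [(i, pos[1]) for i in range(j - 1, -1, -1) if isOnBoard((i, pos[1]))]
--     b = [(i, pos[1]) for i in range(j + 1, MAX_BOARD) if isOnBoard((i, pos[1]))]
--     j = pos[1]
--     c = [(pos[0], i) for i in range(j - 1, -1, -1) if isOnBoard((pos[0], i))]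
--     d = [(pos[0], i) for i in range(j + 1, MAX_BOARD) if isOnBoard((pos[0], i))]
--     aviableMoves = []
--     for x in [a, b, c, d]:
--         for y in x:
--             if y in state:
--                 break
--             aviableMoves.append(y)
--     return aviableMoves
-- ===== SOURCE B (Python) =====
-- def towerMoves(state):
--     x, y = state[1]
--     # one pass over state: nearest on-board blocking piece in each of the four
--     # directions; the board edges (-1 and 8) are the defaults
--     left, right, down, up = -1, 8, -1, 8
--     for px, py in state:
--         if 0 <= px < 8 and 0 <= py < 8:
--             if py == y and px < x:
--                 left = max(left, px)
--             if py == y and px > x: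
--                 right = min(right, px)
--             if px == x and py < y:
--                 down = max(down, py)
--             if px == x and py > y:
--                 up = min(up, py)
--     # a move is an on-board square on the rook's line, strictly between the rook
--     # and the nearest blocker on that side
--     return ([(i, y) for i in range(7, -1, -1) if left < i < x and 0 <= y < 8]
--             + [(i, y) for i in range(8) if x < i < right and 0 <= y < 8]
--             + [(x, i) for i in range(7, -1, -1) if down < i < y and 0 <= x < 8]
--             + [(x, i) for i in range(8) if y < i < up and 0 <= x < 8])
-- ===== Notes on version B (the rewrite author's own statement) =====
-- stated objective: alternative
-- what changed: Instead of generating four candidate rays and membership-testing every candidate square against state with a break, B makes one pass over state to find the nearest on-board blocking piece in each of the four directions (board edges as defaults) and then emits the moves as filtered closed-form ranges strictly between the rook and each blocker; Pre_ excludes only states with fewer than two pieces, on which state[1] raises IndexError.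
import Mathlib
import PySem

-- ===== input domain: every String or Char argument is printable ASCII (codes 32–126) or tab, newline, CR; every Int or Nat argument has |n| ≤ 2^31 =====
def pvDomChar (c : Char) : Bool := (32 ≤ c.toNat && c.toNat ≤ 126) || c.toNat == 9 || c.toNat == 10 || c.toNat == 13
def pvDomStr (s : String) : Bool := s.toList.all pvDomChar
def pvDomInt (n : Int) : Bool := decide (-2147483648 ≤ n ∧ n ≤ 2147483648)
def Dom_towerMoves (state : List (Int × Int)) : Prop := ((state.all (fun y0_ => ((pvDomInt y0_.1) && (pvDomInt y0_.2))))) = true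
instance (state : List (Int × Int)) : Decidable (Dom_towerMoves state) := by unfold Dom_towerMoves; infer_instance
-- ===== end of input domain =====

-- B replaces A's ray generation + per-square membership scan by one pass over state finding the
-- nearest on-board blocker in each direction, then emits moves as filtered closed-form ranges.

-- ===== PORT A =====
def isOnBoardL (p : Int × Int) : Bool :=
  decide (0 ≤ p.1 ∧ p.1 < 8) && decide (0 ≤ p.2 ∧ p.2 < 8)

-- the inner 'for y in x: if y in state: break; aviableMoves.append(y)' loop, with accumulator
def towerInner (state : List (Int × Int)) (acc : List (Int × Int)) :
    List (Int × Int) → List (Int × Int)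
  | [] => acc
  | y :: ys => if y ∈ state then acc else towerInner state (acc ++ [y]) ys

def towerMoves (state : List (Int × Int)) : List (Int × Int) :=
  match PySem.List.pyGet? state 1 with
  | none => []   -- unreachable under Pre_ (Python raises IndexError)
  | some pos =>
    let a := ((PySem.List.pyRange (pos.1 - 1) (-1) (-1)).filter
                (fun i => isOnBoardL (i, pos.2))).map (fun i => (i, pos.2))
    let b := ((PySem.List.pyRange (pos.1 + 1) 8 1).filter
                (fun i => isOnBoardL (i, pos.2))).map (fun i => (i, pos.2))
    let c := ((PySem.List.pyRange (pos.2 - 1) (-1) (-1)).filter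
                (fun i => isOnBoardL (pos.1, i))).map (fun i => (pos.1, i))
    let d := ((PySem.List.pyRange (pos.2 + 1) 8 1).filter
                (fun i => isOnBoardL (pos.1, i))).map (fun i => (pos.1, i))
    [a, b, c, d].foldl (fun acc x => towerInner state acc x) []

-- ===== PORT B =====
def towerMoves_alt (state : List (Int × Int)) : List (Int × Int) :=
  match PySem.List.pyGet? state 1 with
  | none => []   -- unreachable under Pre_ (Python raises IndexError)
  | some pos =>
    let x := pos.1
    let y := pos.2
    -- one pass: nearest on-board blocker per direction, board edges as defaults
    let bnd := state.foldl (fun (z : Int × Int × Int × Int) p =>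
      if 0 ≤ p.1 ∧ p.1 < 8 ∧ 0 ≤ p.2 ∧ p.2 < 8 then
        (if p.2 = y ∧ p.1 < x then max z.1 p.1 else z.1,
         if p.2 = y ∧ p.1 > x then min z.2.1 p.1 else z.2.1,
         if p.1 = x ∧ p.2 < y then max z.2.2.1 p.2 else z.2.2.1,
         if p.1 = x ∧ p.2 > y then min z.2.2.2 p.2 else z.2.2.2)
      else z) (-1, 8, -1, 8)
    -- a move is an on-board square strictly between the rook and the nearest blocker
    ((PySem.List.pyRange 7 (-1) (-1)).filter
        (fun i => decide (bnd.1 < i ∧ i < x ∧ 0 ≤ y ∧ y < 8))).map (fun i => (i, y)) ++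
    ((PySem.List.pyRange 0 8 1).filter
        (fun i => decide (x < i ∧ i < bnd.2.1 ∧ 0 ≤ y ∧ y < 8))).map (fun i => (i, y)) ++
    ((PySem.List.pyRange 7 (-1) (-1)).filter
        (fun i => decide (bnd.2.2.1 < i ∧ i < y ∧ 0 ≤ x ∧ x < 8))).map (fun i => (x, i)) ++
    ((PySem.List.pyRange 0 8 1).filter
        (fun i => decide (y < i ∧ i < bnd.2.2.2 ∧ 0 ≤ x ∧ x < 8))).map (fun i => (x, i))

-- ===== PRECONDITION & SPEC =====
-- Pre_ excludes exactly the states with fewer than two pieces, on which Python's state[1]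
-- raises IndexError.
def Pre_towerMoves (state : List (Int × Int)) : Prop := 2 ≤ state.length
instance (state : List (Int × Int)) : Decidable (Pre_towerMoves state) := by
  unfold Pre_towerMoves; infer_instance

def pvWitness_towerMoves : (List (Int × Int)) := [(0, 0), (3, 3), (1, 3)]

def Spec_towerMoves (state : List (Int × Int)) (out : List (Int × Int)) : Prop := out = towerMoves_alt state
instance (state : List (Int × Int)) (out : List (Int × Int)) : Decidable (Spec_towerMoves state out) := by unfold Spec_towerMoves; infer_instance

-- ===== CLAIM (what is proved, stated in full; the proofs are below) =====
def Claim_equal_towerMoves : Prop := ∀ (state : List (Int × Int)), Dom_towerMoves state → Pre_towerMoves state → Spec_towerMoves state (towerMoves state)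

-- ===== LEMMAS AND PROOFS =====

-- A's inner scan, without the accumulator
def scanS (state : List (Int × Int)) : List (Int × Int) → List (Int × Int)
  | [] => []
  | y :: ys => if y ∈ state then [] else y :: scanS state ys

theorem towerInner_eq (state : List (Int × Int)) :
    ∀ (L acc : List (Int × Int)), towerInner state acc L = acc ++ scanS state L := by
  intro L
  induction L with
  | nil => intro acc; simp [towerInner, scanS]
  | cons y ys ih =>
    intro acc
    by_cases h : y ∈ state <;> simp [towerInner, scanS, h, ih]

-- the result of a filtered running-max fold: above the seed, attained, and an upper bound
theorem foldl_max_props (P : Int × Int → Prop) [DecidablePred P] (g : Int × Int → Int) :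
    ∀ (l : List (Int × Int)) (b0 : Int),
      b0 ≤ l.foldl (fun b p => if P p then max b (g p) else b) b0 ∧
      (l.foldl (fun b p => if P p then max b (g p) else b) b0 = b0 ∨
        ∃ p ∈ l, P p ∧ g p = l.foldl (fun b p => if P p then max b (g p) else b) b0) ∧
      (∀ p ∈ l, P p → g p ≤ l.foldl (fun b p => if P p then max b (g p) else b) b0)
  | [], b0 => by simp
  | q :: l, b0 => by
    obtain ⟨h1, h2, h3⟩ := foldl_max_props P g l (if P q then max b0 (g q) else b0)
    simp only [List.foldl_cons]
    by_cases hq : P q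
    · simp only [if_pos hq] at h1 h2 h3 ⊢
      refine ⟨le_trans (le_max_left _ _) h1, ?_, ?_⟩
      · rcases h2 with h | ⟨p, hp, hPp, hgp⟩
        · rcases max_choice b0 (g q) with hm | hm
          · exact Or.inl (by rw [h, hm])
          · exact Or.inr ⟨q, List.mem_cons_self, hq, by rw [h, hm]⟩
        · exact Or.inr ⟨p, List.mem_cons_of_mem _ hp, hPp, hgp⟩
      · intro p hp hPp
        rcases List.mem_cons.mp hp with rfl | hp'
        · exact le_trans (le_max_right _ _) h1
        · exact h3 p hp' hPp
    · simp only [if_neg hq] at h1 h2 h3 ⊢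
      refine ⟨h1, ?_, ?_⟩
      · rcases h2 with h | ⟨p, hp, hPp, hgp⟩
        · exact Or.inl h
        · exact Or.inr ⟨p, List.mem_cons_of_mem _ hp, hPp, hgp⟩
      · intro p hp hPp
        rcases List.mem_cons.mp hp with rfl | hp'
        · exact absurd hPp hq
        · exact h3 p hp' hPp

-- the result of a filtered running-min fold: below the seed, attained, and a lower bound
theorem foldl_min_props (P : Int × Int → Prop) [DecidablePred P] (g : Int × Int → Int) :
    ∀ (l : List (Int × Int)) (b0 : Int),
      l.foldl (fun b p => if P p then min b (g p) else b) b0 ≤ b0 ∧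
      (l.foldl (fun b p => if P p then min b (g p) else b) b0 = b0 ∨
        ∃ p ∈ l, P p ∧ g p = l.foldl (fun b p => if P p then min b (g p) else b) b0) ∧
      (∀ p ∈ l, P p → l.foldl (fun b p => if P p then min b (g p) else b) b0 ≤ g p)
  | [], b0 => by simp
  | q :: l, b0 => by
    obtain ⟨h1, h2, h3⟩ := foldl_min_props P g l (if P q then min b0 (g q) else b0)
    simp only [List.foldl_cons]
    by_cases hq : P q
    · simp only [if_pos hq] at h1 h2 h3 ⊢
      refine ⟨le_trans h1 (min_le_left _ _), ?_, ?_⟩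
      · rcases h2 with h | ⟨p, hp, hPp, hgp⟩
        · rcases min_choice b0 (g q) with hm | hm
          · exact Or.inl (by rw [h, hm])
          · exact Or.inr ⟨q, List.mem_cons_self, hq, by rw [h, hm]⟩
        · exact Or.inr ⟨p, List.mem_cons_of_mem _ hp, hPp, hgp⟩
      · intro p hp hPp
        rcases List.mem_cons.mp hp with rfl | hp'
        · exact le_trans h1 (min_le_right _ _)
        · exact h3 p hp' hPp
    · simp only [if_neg hq] at h1 h2 h3 ⊢
      refine ⟨h1, ?_, ?_⟩
      · rcases h2 with h | ⟨p, hp, hPp, hgp⟩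
        · exact Or.inl h
        · exact Or.inr ⟨p, List.mem_cons_of_mem _ hp, hPp, hgp⟩
      · intro p hp hPp
        rcases List.mem_cons.mp hp with rfl | hp'
        · exact absurd hPp hq
        · exact h3 p hp' hPp

-- the guarded 4-tuple fold of towerMoves_alt splits into four independent folds
theorem fold4_eq (x y : Int) :
    ∀ (l : List (Int × Int)) (a b c d : Int),
      l.foldl (fun (z : Int × Int × Int × Int) p =>
        if 0 ≤ p.1 ∧ p.1 < 8 ∧ 0 ≤ p.2 ∧ p.2 < 8 then
          (if p.2 = y ∧ p.1 < x then max z.1 p.1 else z.1,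
           if p.2 = y ∧ p.1 > x then min z.2.1 p.1 else z.2.1,
           if p.1 = x ∧ p.2 < y then max z.2.2.1 p.2 else z.2.2.1,
           if p.1 = x ∧ p.2 > y then min z.2.2.2 p.2 else z.2.2.2)
        else z) (a, b, c, d)
      = (l.foldl (fun b p => if (0 ≤ p.1 ∧ p.1 < 8 ∧ 0 ≤ p.2 ∧ p.2 < 8) ∧ p.2 = y ∧ p.1 < x then max b p.1 else b) a,
         l.foldl (fun b p => if (0 ≤ p.1 ∧ p.1 < 8 ∧ 0 ≤ p.2 ∧ p.2 < 8) ∧ p.2 = y ∧ p.1 > x then min b p.1 else b) b,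
         l.foldl (fun b p => if (0 ≤ p.1 ∧ p.1 < 8 ∧ 0 ≤ p.2 ∧ p.2 < 8) ∧ p.1 = x ∧ p.2 < y then max b p.2 else b) c,
         l.foldl (fun b p => if (0 ≤ p.1 ∧ p.1 < 8 ∧ 0 ≤ p.2 ∧ p.2 < 8) ∧ p.1 = x ∧ p.2 > y then min b p.2 else b) d)
  | [], a, b, c, d => rfl
  | q :: l, a, b, c, d => by
    simp only [List.foldl_cons]
    by_cases h : 0 ≤ q.1 ∧ q.1 < 8 ∧ 0 ≤ q.2 ∧ q.2 < 8
    · simp only [h, true_and]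
      exact fold4_eq x y l _ _ _ _
    · simp only [h, false_and, if_false]
      exact fold4_eq x y l a b c d

-- a descending blocked scan is the closed-form range down to the nearest blocker r
theorem scan_desc (state : List (Int × Int)) (mk : Int → Int × Int) (r : Int)
    (hr : -1 ≤ r) (hmem : r = -1 ∨ mk r ∈ state) :
    ∀ (n : Nat) (s : Int), (s - r).toNat ≤ n → r ≤ s →
      (∀ i, mk i ∈ state → i ≤ s → i ≤ r) →
      scanS state ((PySem.List.pyRange s (-1) (-1)).map mk)
        = (PySem.List.pyRange s r (-1)).map mk
  | 0, s, hn, hrs, hub => by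
    have hsr : s = r := by omega
    subst hsr
    rw [PySem.List.pyRange_neg_one_eq_nil (le_refl s)]
    rcases le_or_gt s (-1) with hs | hs
    · rw [PySem.List.pyRange_neg_one_eq_nil hs]; simp [scanS]
    · rcases hmem with h | h
      · omega
      · rw [PySem.List.pyRange_neg_one_cons hs]
        simp [scanS, h]
  | n + 1, s, hn, hrs, hub => by
    rcases eq_or_lt_of_le hrs with heq | hlt
    · exact scan_desc state mk r hr hmem 0 s (by omega) hrs hub
    · have hnot : mk s ∉ state := fun hmem' => absurd (hub s hmem' le_rfl) (by omega)
      rw [PySem.List.pyRange_neg_one_cons (show (-1 : Int) < s by omega),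
          PySem.List.pyRange_neg_one_cons hlt]
      simp only [List.map_cons, scanS, if_neg hnot]
      congr 1
      exact scan_desc state mk r hr hmem n (s - 1) (by omega) (by omega)
        (fun i h1 h2 => hub i h1 (by omega))

-- an ascending blocked scan is the closed-form range up to the nearest blocker r
theorem scan_asc (state : List (Int × Int)) (mk : Int → Int × Int) (r : Int)
    (hr : r ≤ 8) (hmem : r = 8 ∨ mk r ∈ state) :
    ∀ (n : Nat) (s : Int), (r - s).toNat ≤ n → s ≤ r →
      (∀ i, mk i ∈ state → s ≤ i → r ≤ i) →
      scanS state ((PySem.List.pyRange s 8 1).map mk)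
        = (PySem.List.pyRange s r 1).map mk
  | 0, s, hn, hrs, hlb => by
    have hsr : s = r := by omega
    subst hsr
    rw [PySem.List.pyRange_one_eq_nil (le_refl s)]
    rcases le_or_gt 8 s with hs | hs
    · rw [PySem.List.pyRange_one_eq_nil hs]; simp [scanS]
    · rcases hmem with h | h
      · omega
      · rw [PySem.List.pyRange_one_cons hs]
        simp [scanS, h]
  | n + 1, s, hn, hrs, hlb => by
    rcases eq_or_lt_of_le hrs with heq | hlt
    · exact scan_asc state mk r hr hmem 0 s (by omega) hrs hlb
    · have hnot : mk s ∉ state := fun hmem' => absurd (hlb s hmem' le_rfl) (by omega)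
      rw [PySem.List.pyRange_one_cons (show s < 8 by omega),
          PySem.List.pyRange_one_cons hlt]
      simp only [List.map_cons, scanS, if_neg hnot]
      congr 1
      exact scan_asc state mk r hr hmem n (s + 1) (by omega) (by omega)
        (fun i h1 h2 => hlb i h1 (by omega))

-- the board filter keeps a descending count-down range already inside the board
theorem filt_desc_small (a : Int) (h : a ≤ 7) :
    (PySem.List.pyRange a (-1) (-1)).filter (fun i => decide (0 ≤ i ∧ i < 8))
      = PySem.List.pyRange a (-1) (-1) := by
  rw [List.filter_eq_self.mpr]
  intro i hi
  rw [PySem.List.mem_pyRange_neg_one] at hi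
  simp only [decide_eq_true_eq]
  omega

theorem filt_desc_aux : ∀ n : Nat,
    (PySem.List.pyRange (8 + (n : Int)) (-1) (-1)).filter (fun i => decide (0 ≤ i ∧ i < 8))
      = PySem.List.pyRange 7 (-1) (-1)
  | 0 => by
    rw [show ((8 : Int) + ((0 : Nat) : Int)) = 8 by norm_num,
        PySem.List.pyRange_neg_one_cons (by norm_num)]
    have hf : ¬ (0 ≤ (8 : Int) ∧ (8 : Int) < 8) := by omega
    simp only [List.filter_cons, hf, decide_false, show (8 : Int) - 1 = 7 by norm_num]
    exact filt_desc_small 7 (by norm_num)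
  | n + 1 => by
    rw [show ((8 : Int) + ((n + 1 : Nat) : Int)) = (8 + (n : Int)) + 1 by push_cast; ring,
        PySem.List.pyRange_neg_one_cons (by omega)]
    have hf : ¬ (0 ≤ (8 + (n : Int) + 1) ∧ (8 + (n : Int) + 1) < 8) := by omega
    simp only [List.filter_cons, hf, decide_false,
      show (8 + (n : Int) + 1 - 1) = 8 + (n : Int) by ring]
    exact filt_desc_aux n

-- the board filter collapses a descending count-down range to one clamped at 7
theorem filt_desc (a : Int) :
    (PySem.List.pyRange a (-1) (-1)).filter (fun i => decide (0 ≤ i ∧ i < 8))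
      = PySem.List.pyRange (min a 7) (-1) (-1) := by
  rcases le_or_gt a 7 with h | h
  · rw [min_eq_left h]; exact filt_desc_small a h
  · rw [min_eq_right (by omega),
       show a = 8 + ((a - 8).toNat : Int) by omega]
    exact filt_desc_aux (a - 8).toNat

-- the board filter collapses an ascending range to one clamped at 0
theorem filt_asc (a : Int) :
    (PySem.List.pyRange a 8 1).filter (fun i => decide (0 ≤ i ∧ i < 8))
      = PySem.List.pyRange (max a 0) 8 1 := by
  rcases le_or_gt 0 a with h | h
  · rw [max_eq_left h, List.filter_eq_self.mpr]
    intro i hi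
    rw [PySem.List.mem_pyRange_one] at hi
    simp only [decide_eq_true_eq]; omega
  · rw [max_eq_right (by omega),
        PySem.List.pyRange_one_append a 0 8 (by omega) (by omega), List.filter_append]
    have h1 : (PySem.List.pyRange a 0 1).filter (fun i => decide (0 ≤ i ∧ i < 8)) = [] := by
      rw [List.filter_eq_nil_iff]
      intro i hi
      rw [PySem.List.mem_pyRange_one] at hi
      simp only [decide_eq_true_eq]; omega
    have h2 : (PySem.List.pyRange 0 8 1).filter (fun i => decide (0 ≤ i ∧ i < 8))
        = PySem.List.pyRange 0 8 1 := by
      rw [List.filter_eq_self.mpr]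
      intro i hi
      rw [PySem.List.mem_pyRange_one] at hi
      simp only [decide_eq_true_eq]; omega
    rw [h1, h2, List.nil_append]

-- B's between-blockers filter of a descending board range is a closed-form range
theorem filt_to_desc (L x : Int) (hL : -1 ≤ L) :
    ∀ (n : Nat) (a : Int), (a + 1).toNat ≤ n →
      (PySem.List.pyRange a (-1) (-1)).filter (fun i => decide (L < i ∧ i < x))
        = PySem.List.pyRange (min (x - 1) a) L (-1)
  | 0, a, hn => by
    rw [PySem.List.pyRange_neg_one_eq_nil (by omega), List.filter_nil,
        PySem.List.pyRange_neg_one_eq_nil (by omega)]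
  | n + 1, a, hn => by
    rcases le_or_gt a (-1) with ha | ha
    · rw [PySem.List.pyRange_neg_one_eq_nil (by omega), List.filter_nil,
          PySem.List.pyRange_neg_one_eq_nil (by omega)]
    · rw [PySem.List.pyRange_neg_one_cons ha, List.filter_cons]
      by_cases hk : L < a ∧ a < x
      · rw [if_pos (by simpa using hk), filt_to_desc L x hL n (a - 1) (by omega)]
        rw [show min (x - 1) a = a by omega, show min (x - 1) (a - 1) = a - 1 by omega,
            PySem.List.pyRange_neg_one_cons (show L < a from hk.1)]
      · rw [if_neg (by simpa using hk), filt_to_desc L x hL n (a - 1) (by omega)]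
        rcases (show a ≥ x ∨ a ≤ L by omega) with hc | hc
        · rw [show min (x - 1) (a - 1) = min (x - 1) a by omega]
        · rw [PySem.List.pyRange_neg_one_eq_nil (by omega),
              PySem.List.pyRange_neg_one_eq_nil (by omega)]
  termination_by n => n

-- B's between-blockers filter of an ascending board range is a closed-form range
theorem filt_to_asc (R x : Int) (hR : R ≤ 8) :
    ∀ (n : Nat) (a : Int), (8 - a).toNat ≤ n →
      (PySem.List.pyRange a 8 1).filter (fun i => decide (x < i ∧ i < R))
        = PySem.List.pyRange (max (x + 1) a) R 1
  | 0, a, hn => by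
    rw [PySem.List.pyRange_one_eq_nil (by omega), List.filter_nil,
        PySem.List.pyRange_one_eq_nil (by omega)]
  | n + 1, a, hn => by
    rcases le_or_gt 8 a with ha | ha
    · rw [PySem.List.pyRange_one_eq_nil (by omega), List.filter_nil,
          PySem.List.pyRange_one_eq_nil (by omega)]
    · rw [PySem.List.pyRange_one_cons ha, List.filter_cons]
      by_cases hk : x < a ∧ a < R
      · rw [if_pos (by simpa using hk), filt_to_asc R x hR n (a + 1) (by omega)]
        rw [show max (x + 1) a = a by omega, show max (x + 1) (a + 1) = a + 1 by omega,
            PySem.List.pyRange_one_cons (show a < R from hk.2)]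
      · rw [if_neg (by simpa using hk), filt_to_asc R x hR n (a + 1) (by omega)]
        rcases (show a ≤ x ∨ a ≥ R by omega) with hc | hc
        · rw [show max (x + 1) (a + 1) = max (x + 1) a by omega]
        · rw [PySem.List.pyRange_one_eq_nil (by omega),
              PySem.List.pyRange_one_eq_nil (by omega)]
  termination_by n => n

-- one descending direction: A's filtered-ray scan equals B's between-blockers range
theorem dir_desc (st : List (Int × Int)) (mk : Int → Int × Int) (x L : Int)
    (hL1 : -1 ≤ L) (hmem : L = -1 ∨ mk L ∈ st) (hLx : L = -1 ∨ (L < x ∧ L ≤ 7))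
    (hub : ∀ i, mk i ∈ st → 0 ≤ i → i < 8 → i < x → i ≤ L) :
    scanS st (((PySem.List.pyRange (x - 1) (-1) (-1)).filter
        (fun i => decide (0 ≤ i ∧ i < 8))).map mk)
      = ((PySem.List.pyRange 7 (-1) (-1)).filter (fun i => decide (L < i ∧ i < x))).map mk := by
  rw [filt_desc, filt_to_desc L x hL1 8 7 (by norm_num)]
  rcases le_or_gt x 0 with hx | hx
  · rw [PySem.List.pyRange_neg_one_eq_nil (show min (x - 1) 7 ≤ -1 by omega),
        PySem.List.pyRange_neg_one_eq_nil (show min (x - 1) 7 ≤ L by omega)]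
    simp [scanS]
  · rw [show min (x - 1) 7 = min (x - 1) 7 from rfl]
    exact scan_desc st mk L hL1 hmem (min (x - 1) 7 - L).toNat (min (x - 1) 7) le_rfl
      (by omega)
      (fun i hi hile => by
        rcases le_or_gt 0 i with h0 | h0
        · exact hub i hi h0 (by omega) (by omega)
        · omega)

-- one ascending direction: A's filtered-ray scan equals B's between-blockers range
theorem dir_asc (st : List (Int × Int)) (mk : Int → Int × Int) (x R : Int)
    (hR8 : R ≤ 8) (hmem : R = 8 ∨ mk R ∈ st) (hRx : R = 8 ∨ (x < R ∧ 0 ≤ R))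
    (hlb : ∀ i, mk i ∈ st → 0 ≤ i → i < 8 → x < i → R ≤ i) :
    scanS st (((PySem.List.pyRange (x + 1) 8 1).filter
        (fun i => decide (0 ≤ i ∧ i < 8))).map mk)
      = ((PySem.List.pyRange 0 8 1).filter (fun i => decide (x < i ∧ i < R))).map mk := by
  rw [filt_asc, filt_to_asc R x hR8 8 0 (by norm_num)]
  rcases le_or_gt 8 x with hx | hx
  · rw [PySem.List.pyRange_one_eq_nil (show (8 : Int) ≤ max (x + 1) 0 by omega),
        PySem.List.pyRange_one_eq_nil (show R ≤ max (x + 1) 0 by omega)]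
    simp [scanS]
  · exact scan_asc st mk R hR8 hmem (R - max (x + 1) 0).toNat (max (x + 1) 0) le_rfl
      (by omega)
      (fun i hi hile => by
        rcases le_or_gt 8 i with h8 | h8
        · omega
        · exact hlb i hi (by omega) h8 (by omega))

-- ===== VERDICT (by name: the statement is the Claim_ definition above) =====
theorem towerMoves_spec : Claim_equal_towerMoves := by
  intro state _ hpre
  match state, hpre with
  | p0 :: p1 :: rest, _ =>
    set st := p0 :: p1 :: rest with hst
    have hget : PySem.List.pyGet? st 1 = some p1 := by
      simp [hst, PySem.List.pyGet?, PySem.List.pyIdx?]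
    simp only [Spec_towerMoves, towerMoves, towerMoves_alt, hget]
    rw [fold4_eq]
    -- abbreviations for the four fold results
    set x := p1.1 with hx
    set y := p1.2 with hy
    obtain ⟨l1, l2, l3⟩ := foldl_max_props
      (fun p => (0 ≤ p.1 ∧ p.1 < 8 ∧ 0 ≤ p.2 ∧ p.2 < 8) ∧ p.2 = y ∧ p.1 < x) (fun p => p.1) st (-1)
    obtain ⟨r1, r2, r3⟩ := foldl_min_props
      (fun p => (0 ≤ p.1 ∧ p.1 < 8 ∧ 0 ≤ p.2 ∧ p.2 < 8) ∧ p.2 = y ∧ p.1 > x) (fun p => p.1) st 8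
    obtain ⟨d1, d2, d3⟩ := foldl_max_props
      (fun p => (0 ≤ p.1 ∧ p.1 < 8 ∧ 0 ≤ p.2 ∧ p.2 < 8) ∧ p.1 = x ∧ p.2 < y) (fun p => p.2) st (-1)
    obtain ⟨u1, u2, u3⟩ := foldl_min_props
      (fun p => (0 ≤ p.1 ∧ p.1 < 8 ∧ 0 ≤ p.2 ∧ p.2 < 8) ∧ p.1 = x ∧ p.2 > y) (fun p => p.2) st 8
    set L := st.foldl (fun b p => if (0 ≤ p.1 ∧ p.1 < 8 ∧ 0 ≤ p.2 ∧ p.2 < 8) ∧ p.2 = y ∧ p.1 < x then max b p.1 else b) (-1) with hL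
    set R := st.foldl (fun b p => if (0 ≤ p.1 ∧ p.1 < 8 ∧ 0 ≤ p.2 ∧ p.2 < 8) ∧ p.2 = y ∧ p.1 > x then min b p.1 else b) 8 with hR
    set D := st.foldl (fun b p => if (0 ≤ p.1 ∧ p.1 < 8 ∧ 0 ≤ p.2 ∧ p.2 < 8) ∧ p.1 = x ∧ p.2 < y then max b p.2 else b) (-1) with hD
    set U := st.foldl (fun b p => if (0 ≤ p.1 ∧ p.1 < 8 ∧ 0 ≤ p.2 ∧ p.2 < 8) ∧ p.1 = x ∧ p.2 > y then min b p.2 else b) 8 with hU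
    -- the four list identities
    have eA : scanS st (((PySem.List.pyRange (x - 1) (-1) (-1)).filter
          (fun i => isOnBoardL (i, y))).map (fun i => (i, y)))
        = ((PySem.List.pyRange 7 (-1) (-1)).filter
          (fun i => decide (L < i ∧ i < x ∧ 0 ≤ y ∧ y < 8))).map (fun i => (i, y)) := by
      by_cases hyb : 0 ≤ y ∧ y < 8
      · have f1 : (PySem.List.pyRange (x - 1) (-1) (-1)).filter (fun i => isOnBoardL (i, y))
            = (PySem.List.pyRange (x - 1) (-1) (-1)).filter (fun i => decide (0 ≤ i ∧ i < 8)) :=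
          List.filter_congr (fun i _ => by simp [isOnBoardL, hyb.1, hyb.2])
        have f2 : (PySem.List.pyRange 7 (-1) (-1)).filter
              (fun i => decide (L < i ∧ i < x ∧ 0 ≤ y ∧ y < 8))
            = (PySem.List.pyRange 7 (-1) (-1)).filter (fun i => decide (L < i ∧ i < x)) :=
          List.filter_congr (fun i _ => by simp [hyb.1, hyb.2])
        rw [f1, f2]
        refine dir_desc st (fun i => (i, y)) x L l1 ?_ ?_ ?_
        · rcases l2 with h | ⟨p, hp, ⟨_, hpy, _⟩, hgp⟩
          · exact Or.inl h
          · right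
            have hpe : p = (L, y) := by
              rcases p with ⟨pa, pb⟩; simp only at hpy hgp; simp [hgp, hpy]
            rw [hpe] at hp; simpa using hp
        · rcases l2 with h | ⟨p, hp, ⟨hb, _, hlt⟩, hgp⟩
          · exact Or.inl h
          · exact Or.inr ⟨by omega, by omega⟩
        · intro i hi h0 h8 hlt
          exact l3 (i, y) hi ⟨⟨h0, h8, hyb.1, hyb.2⟩, rfl, hlt⟩
      · rw [List.filter_eq_nil_iff.mpr (fun i _ => by simp [isOnBoardL]; omega),
            List.filter_eq_nil_iff.mpr (fun i _ => by simp; omega)]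
        simp [scanS]
    have eB : scanS st (((PySem.List.pyRange (x + 1) 8 1).filter
          (fun i => isOnBoardL (i, y))).map (fun i => (i, y)))
        = ((PySem.List.pyRange 0 8 1).filter
          (fun i => decide (x < i ∧ i < R ∧ 0 ≤ y ∧ y < 8))).map (fun i => (i, y)) := by
      by_cases hyb : 0 ≤ y ∧ y < 8
      · have f1 : (PySem.List.pyRange (x + 1) 8 1).filter (fun i => isOnBoardL (i, y))
            = (PySem.List.pyRange (x + 1) 8 1).filter (fun i => decide (0 ≤ i ∧ i < 8)) :=
          List.filter_congr (fun i _ => by simp [isOnBoardL, hyb.1, hyb.2])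
        have f2 : (PySem.List.pyRange 0 8 1).filter
              (fun i => decide (x < i ∧ i < R ∧ 0 ≤ y ∧ y < 8))
            = (PySem.List.pyRange 0 8 1).filter (fun i => decide (x < i ∧ i < R)) :=
          List.filter_congr (fun i _ => by simp [hyb.1, hyb.2])
        rw [f1, f2]
        refine dir_asc st (fun i => (i, y)) x R r1 ?_ ?_ ?_
        · rcases r2 with h | ⟨p, hp, ⟨_, hpy, _⟩, hgp⟩
          · exact Or.inl h
          · right
            have hpe : p = (R, y) := by
              rcases p with ⟨pa, pb⟩; simp only at hpy hgp; simp [hgp, hpy]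
            rw [hpe] at hp; simpa using hp
        · rcases r2 with h | ⟨p, hp, ⟨hb, _, hgt⟩, hgp⟩
          · exact Or.inl h
          · exact Or.inr ⟨by omega, by omega⟩
        · intro i hi h0 h8 hgt
          exact r3 (i, y) hi ⟨⟨h0, h8, hyb.1, hyb.2⟩, rfl, hgt⟩
      · rw [List.filter_eq_nil_iff.mpr (fun i _ => by simp [isOnBoardL]; omega),
            List.filter_eq_nil_iff.mpr (fun i _ => by simp; omega)]
        simp [scanS]
    have eC : scanS st (((PySem.List.pyRange (y - 1) (-1) (-1)).filter
          (fun i => isOnBoardL (x, i))).map (fun i => (x, i)))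
        = ((PySem.List.pyRange 7 (-1) (-1)).filter
          (fun i => decide (D < i ∧ i < y ∧ 0 ≤ x ∧ x < 8))).map (fun i => (x, i)) := by
      by_cases hxb : 0 ≤ x ∧ x < 8
      · have f1 : (PySem.List.pyRange (y - 1) (-1) (-1)).filter (fun i => isOnBoardL (x, i))
            = (PySem.List.pyRange (y - 1) (-1) (-1)).filter (fun i => decide (0 ≤ i ∧ i < 8)) :=
          List.filter_congr (fun i _ => by simp [isOnBoardL, hxb.1, hxb.2])
        have f2 : (PySem.List.pyRange 7 (-1) (-1)).filter
              (fun i => decide (D < i ∧ i < y ∧ 0 ≤ x ∧ x < 8))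
            = (PySem.List.pyRange 7 (-1) (-1)).filter (fun i => decide (D < i ∧ i < y)) :=
          List.filter_congr (fun i _ => by simp [hxb.1, hxb.2])
        rw [f1, f2]
        refine dir_desc st (fun i => (x, i)) y D d1 ?_ ?_ ?_
        · rcases d2 with h | ⟨p, hp, ⟨_, hpx, _⟩, hgp⟩
          · exact Or.inl h
          · right
            have hpe : p = (x, D) := by
              rcases p with ⟨pa, pb⟩; simp only at hpx hgp; simp [hgp, hpx]
            rw [hpe] at hp; simpa using hp
        · rcases d2 with h | ⟨p, hp, ⟨hb, _, hlt⟩, hgp⟩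
          · exact Or.inl h
          · exact Or.inr ⟨by omega, by omega⟩
        · intro i hi h0 h8 hlt
          exact d3 (x, i) hi ⟨⟨hxb.1, hxb.2, h0, h8⟩, rfl, hlt⟩
      · rw [List.filter_eq_nil_iff.mpr (fun i _ => by simp [isOnBoardL]; omega),
            List.filter_eq_nil_iff.mpr (fun i _ => by simp; omega)]
        simp [scanS]
    have eD : scanS st (((PySem.List.pyRange (y + 1) 8 1).filter
          (fun i => isOnBoardL (x, i))).map (fun i => (x, i)))
        = ((PySem.List.pyRange 0 8 1).filter
          (fun i => decide (y < i ∧ i < U ∧ 0 ≤ x ∧ x < 8))).map (fun i => (x, i)) := by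
      by_cases hxb : 0 ≤ x ∧ x < 8
      · have f1 : (PySem.List.pyRange (y + 1) 8 1).filter (fun i => isOnBoardL (x, i))
            = (PySem.List.pyRange (y + 1) 8 1).filter (fun i => decide (0 ≤ i ∧ i < 8)) :=
          List.filter_congr (fun i _ => by simp [isOnBoardL, hxb.1, hxb.2])
        have f2 : (PySem.List.pyRange 0 8 1).filter
              (fun i => decide (y < i ∧ i < U ∧ 0 ≤ x ∧ x < 8))
            = (PySem.List.pyRange 0 8 1).filter (fun i => decide (y < i ∧ i < U)) :=
          List.filter_congr (fun i _ => by simp [hxb.1, hxb.2])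
        rw [f1, f2]
        refine dir_asc st (fun i => (x, i)) y U u1 ?_ ?_ ?_
        · rcases u2 with h | ⟨p, hp, ⟨_, hpx, _⟩, hgp⟩
          · exact Or.inl h
          · right
            have hpe : p = (x, U) := by
              rcases p with ⟨pa, pb⟩; simp only at hpx hgp; simp [hgp, hpx]
            rw [hpe] at hp; simpa using hp
        · rcases u2 with h | ⟨p, hp, ⟨hb, _, hgt⟩, hgp⟩
          · exact Or.inl h
          · exact Or.inr ⟨by omega, by omega⟩
        · intro i hi h0 h8 hgt
          exact u3 (x, i) hi ⟨⟨hxb.1, hxb.2, h0, h8⟩, rfl, hgt⟩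
      · rw [List.filter_eq_nil_iff.mpr (fun i _ => by simp [isOnBoardL]; omega),
            List.filter_eq_nil_iff.mpr (fun i _ => by simp; omega)]
        simp [scanS]
    simp only [List.foldl, towerInner_eq, List.nil_append, eA, eB, eC, eD, List.append_assoc]
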